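-- pv_equiv track=rewrite | github.com/HolyJack/RegexEngine | regex/regex.py | regex_string_improved
-- ===== SOURCE A (Python) =====
-- def regex_char(single_regex, c) -> bool:
--     if not single_regex:
--         return True
--     elif single_regex == ".":
--         return True
--     elif not c:
--         return False
--     elif single_regex == c:
--         return True
--     return False
--
-- def regex_string_plus_handle(regex, string_):
--     if not string_:
--         return False
--     elif regex_char(regex[0], string_[0]):
--         return regex_string_plus_handle(regex, string_[1:]) or regex_string(regex[2:], string_[1:])
--     return False
--
-- def regex_string(regex, string_):
--     if not regex:
--         return True
--
--     elif not string_ and regex == "$":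
--         return True
--
--     elif not string_:
--         return False
--
--     elif regex[0] == '\\':
--         return regex_string(regex[1:], string_)
--
--     elif regex_char(regex[0], string_[0]) and regex[1:] and regex[1] == '+':
--         return regex_string_plus_handle(regex, string_[1:]) or\
--                regex_string(regex[2:], string_[1:])
--
--     elif regex_char(regex[0], string_[0]) and regex[1:] and regex[1] == '*':
--         return regex_string(regex, string_[1:]) or\
--                regex_string(regex[2:], string_)
--
--     elif regex_char(regex[0], string_[0]) and regex[1:] and regex[1] == '?':
--         return regex_string(regex[2:], string_[1:]) or\
--                regex_string(regex[2:], string_)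
--
--     elif regex_char(regex[0], string_[0]):
--         return regex_string(regex[1:], string_[1:])
--
--     elif regex[1:] and (regex[1] == '?' or regex[1] == '*'):
--         return regex_string(regex[2:], string_)
--
--     return False
--
-- def regex_string_improved(regex, string_):
--     if not regex:
--         return True
--     elif not string_:
--         return False
--     elif regex[0] == '^':
--         return regex_string(regex[1:], string_)
--     elif not regex_string(regex, string_):
--         return regex_string_improved(regex, string_[1:])
--     elif regex_string(regex, string_):
--         return True
--     return False
-- ===== SOURCE B (Python) =====
-- def regex_string_improved(regex, string_):
--     if not regex:
--         return True
--     if not string_: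
--         return False
--     m, n = len(regex), len(string_)
--     lit = list(regex)
--     dot = [ch == '.' for ch in lit]
--     esc = [ch == '\\' for ch in lit]
--     nxtq = [regex[i + 1] if i + 1 < m and regex[i + 1] in '+*?' else '' for i in range(m)]
--     plus_idx = [i for i in range(m) if nxtq[i] == '+']
--     M = [(i == m) or (regex[i:] == '$') for i in range(m + 1)] + [True, True]
--     P = [False] * (m + 3)
--     found = False
--     rng = range(m - 1, -1, -1)
--     for j in range(n - 1, -1, -1):
--         c = string_[j]
--         nM, nP = M, P
--         if plus_idx:
--             P = [False] * (m + 3)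
--             for i in plus_idx:
--                 P[i] = (lit[i] == c or dot[i]) and (nP[i] or nM[i + 2])
--         M = [True] * (m + 3)
--         for i in rng:
--             if esc[i]:
--                 M[i] = M[i + 1]
--                 continue
--             q = nxtq[i]
--             if lit[i] == c or dot[i]:
--                 if not q:
--                     M[i] = nM[i + 1]
--                 elif q == '+':
--                     M[i] = nP[i] or nM[i + 2]
--                 elif q == '*':
--                     M[i] = nM[i] or M[i + 2]
--                 else:
--                     M[i] = nM[i + 2] or M[i + 2]
--             else:
--                 M[i] = (q == '?' or q == '*') and M[i + 2]
--         found = found or M[0]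
--     if regex[0] == '^':
--         return M[1]
--     return found
-- ===== Notes on version B (the rewrite author's own statement) =====
-- stated objective: alternative
-- what changed: Replaced the mutual backtracking recursion (re-tried from every start position) by one bottom-up dynamic-programming pass that fills two boolean rows per string position over all regex positions and ORs the start-position entries; worst-case cost becomes polynomial at the price of always building the whole table.
import Mathlib
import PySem

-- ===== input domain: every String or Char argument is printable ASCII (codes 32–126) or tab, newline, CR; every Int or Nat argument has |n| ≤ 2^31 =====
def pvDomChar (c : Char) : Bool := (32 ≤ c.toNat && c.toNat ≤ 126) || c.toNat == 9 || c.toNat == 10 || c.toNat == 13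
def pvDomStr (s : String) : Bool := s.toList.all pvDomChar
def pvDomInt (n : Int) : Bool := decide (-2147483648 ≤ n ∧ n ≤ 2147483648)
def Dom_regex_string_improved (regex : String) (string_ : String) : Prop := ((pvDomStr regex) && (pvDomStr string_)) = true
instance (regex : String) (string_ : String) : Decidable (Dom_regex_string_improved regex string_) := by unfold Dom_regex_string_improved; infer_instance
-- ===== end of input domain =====

-- B fills a bottom-up DP table over (regex position, string position) instead of A's backtracking recursion; return values proved equal on all of Dom.


-- ===== PORT A =====
-- Python's regex_char receives one-character strings (from indexing), so the
-- `not single_regex` / `not c` branches can never fire; ported over Char.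
def pvRegexChar (single_regex : Char) (c : Char) : Bool :=
  if single_regex == '.' then true
  else if single_regex == c then true
  else false

mutual
-- regex_string; regex[2:] = rt.tail when regex = r0 :: rt
def pvRegexString : List Char → List Char → Bool
  | [], _ => true
  | r0 :: rt, [] => r0 == '$' && rt.isEmpty   -- "not string_ and regex == '$'" then "not string_ → False"
  | r0 :: rt, c :: st =>
    if r0 == '\\' then pvRegexString rt (c :: st)
    else if pvRegexChar r0 c && rt.head? == some '+' then
      pvPlusHandle (r0 :: rt) st || pvRegexString rt.tail st
    else if pvRegexChar r0 c && rt.head? == some '*' then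
      pvRegexString (r0 :: rt) st || pvRegexString rt.tail (c :: st)
    else if pvRegexChar r0 c && rt.head? == some '?' then
      pvRegexString rt.tail st || pvRegexString rt.tail (c :: st)
    else if pvRegexChar r0 c then pvRegexString rt st
    else if rt.head? == some '?' || rt.head? == some '*' then pvRegexString rt.tail (c :: st)
    else false
  termination_by r s => (s.length, r.length)
  decreasing_by all_goals (simp_wf; first | exact Prod.Lex.right _ (by omega) | exact Prod.Lex.left _ _ (by omega))

-- regex_string_plus_handle
def pvPlusHandle : List Char → List Char → Bool
  | _, [] => false
  | [], _ :: _ => false   -- unreachable: Python would raise IndexError at regex[0]; plus_handle is only invoked with a nonempty regex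
  | r0 :: rt, c :: st =>
    if pvRegexChar r0 c then pvPlusHandle (r0 :: rt) st || pvRegexString rt.tail st
    else false
  termination_by r s => (s.length, r.length)
  decreasing_by all_goals (simp_wf; first | exact Prod.Lex.right _ (by omega) | exact Prod.Lex.left _ _ (by omega))
end

def pvImprovedGo : List Char → List Char → Bool
  | [], _ => true
  | _ :: _, [] => false
  | r0 :: rt, c :: st =>
    if r0 == '^' then pvRegexString rt (c :: st)
    else if !(pvRegexString (r0 :: rt) (c :: st)) then pvImprovedGo (r0 :: rt) st
    else if pvRegexString (r0 :: rt) (c :: st) then true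
    else false

def regex_string_improved (regex : String) (string_ : String) : Bool :=
  pvImprovedGo regex.toList string_.toList

-- ===== PORT B =====
def pvCharMatch (r0 : Char) (c : Char) : Bool := r0 == '.' || r0 == c

-- read an entry of an M-row; past the end the regex suffix is empty, which always matches
def pvGetT (l : List Bool) : Bool := l.headD true

-- base row: string suffix empty; entry k says whether regex suffix r[k:] matches ""
def pvBaseRow : List Char → List Bool × List Bool
  | [] => ([true], [false])
  | r0 :: rt =>
    let prev := pvBaseRow rt
    ((r0 == '$' && rt.isEmpty) :: prev.1, false :: prev.2)

-- one DP row for string suffix c :: st, given the rows nM/nP for st (aligned with the regex suffixes)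
def pvBuildRow (c : Char) : List Char → List Bool → List Bool → List Bool × List Bool
  | [], _, _ => ([true], [false])
  | r0 :: rt, nM, nP =>
    let prev := pvBuildRow c rt nM.tail nP.tail
    let mt := prev.1
    let mc := pvCharMatch r0 c
    let p0 := if rt.head? == some '+' then mc && (nP.headD false || pvGetT nM.tail.tail) else false
    let m0 :=
      if r0 == '\\' then pvGetT mt
      else if mc && rt.head? == some '+' then nP.headD false || pvGetT nM.tail.tail
      else if mc && rt.head? == some '*' then pvGetT nM || pvGetT mt.tail
      else if mc && rt.head? == some '?' then pvGetT nM.tail.tail || pvGetT mt.tail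
      else if mc then pvGetT nM.tail
      else if rt.head? == some '?' || rt.head? == some '*' then pvGetT mt.tail
      else false
    (m0 :: mt, p0 :: prev.2)

-- all rows from the bottom up, together with the OR of the start entries M[0][j] for j < n
def pvBuildRows (r : List Char) : List Char → (List Bool × List Bool) × Bool
  | [] => (pvBaseRow r, false)
  | c :: st =>
    let next := pvBuildRows r st
    let row := pvBuildRow c r next.1.1 next.1.2
    (row, pvGetT row.1 || next.2)

def regex_string_improved_alt (regex : String) (string_ : String) : Bool :=
  match regex.toList, string_.toList with
  | [], _ => true
  | _ :: _, [] => false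
  | r0 :: rt, c :: st =>
    let res := pvBuildRows (r0 :: rt) (c :: st)
    if r0 == '^' then pvGetT res.1.1.tail else res.2

-- ===== PRECONDITION & SPEC =====
def Spec_regex_string_improved (regex : String) (string_ : String) (out : Bool) : Prop := out = regex_string_improved_alt regex string_
instance (regex : String) (string_ : String) (out : Bool) : Decidable (Spec_regex_string_improved regex string_ out) := by unfold Spec_regex_string_improved; infer_instance

-- ===== CLAIM (what is proved, stated in full; the proofs are below) =====
def Claim_equal_regex_string_improved : Prop := ∀ (regex : String) (string_ : String), Dom_regex_string_improved regex string_ → Spec_regex_string_improved regex string_ (regex_string_improved regex string_)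

-- ===== LEMMAS AND PROOFS =====

theorem pvGetT_cons (a : Bool) (l : List Bool) : pvGetT (a :: l) = a := rfl

theorem pvGetT_tails_map (l : List Char) (f : List Char → Bool) :
    pvGetT ((l.tails.map f)) = f l := by
  cases l <;> simp [pvGetT]

theorem pvGetT_tail_tails_map (l : List Char) (f : List Char → Bool) (h : f [] = true) :
    pvGetT ((l.tails.map f).tail) = f l.tail := by
  cases l with
  | nil => simpa [pvGetT] using h.symm
  | cons a t => cases t <;> simp [pvGetT]

theorem pvCharMatch_eq (r0 c : Char) : pvCharMatch r0 c = pvRegexChar r0 c := by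
  cases h1 : r0 == '.' <;> cases h2 : r0 == c <;>
    simp [pvCharMatch, pvRegexChar, h1, h2]

-- the value the B port keeps in the P row: plus_handle, but only at '+' positions (False elsewhere)
def pvPlusG : List Char → List Char → Bool
  | [], _ => false
  | r0 :: rt, s => if rt.head? == some '+' then pvPlusHandle (r0 :: rt) s else false

theorem pvPlusG_nil_str (r : List Char) : pvPlusG r [] = false := by
  cases r with
  | nil => rfl
  | cons r0 rt => cases h : rt.head? == some '+' <;> simp [pvPlusG, h, pvPlusHandle]

theorem pvBaseRow_eq (r : List Char) :
    pvBaseRow r = (r.tails.map (fun r' => pvRegexString r' []),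
                   r.tails.map (fun r' => pvPlusG r' [])) := by
  induction r with
  | nil => simp [pvBaseRow, pvRegexString, pvPlusG]
  | cons r0 rt ih => simp [pvBaseRow, ih, pvRegexString, pvPlusG_nil_str]

theorem pvBuildRow_eq (c : Char) (st : List Char) (r : List Char) :
    pvBuildRow c r (r.tails.map (fun r' => pvRegexString r' st))
                   (r.tails.map (fun r' => pvPlusG r' st))
      = (r.tails.map (fun r' => pvRegexString r' (c :: st)),
         r.tails.map (fun r' => pvPlusG r' (c :: st))) := by
  induction r with
  | nil => simp [pvBuildRow, pvRegexString, pvPlusG]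
  | cons r0 rt ih =>
    have hA : pvGetT ((rt.tails.map (fun r' => pvRegexString r' st)).tail)
        = pvRegexString rt.tail st :=
      pvGetT_tail_tails_map rt _ (by simp [pvRegexString])
    have hB : pvGetT (rt.tails.map (fun r' => pvRegexString r' st))
        = pvRegexString rt st := pvGetT_tails_map _ _
    have hC : pvGetT (rt.tails.map (fun r' => pvRegexString r' (c :: st)))
        = pvRegexString rt (c :: st) := pvGetT_tails_map _ _
    have hD : pvGetT ((rt.tails.map (fun r' => pvRegexString r' (c :: st))).tail)
        = pvRegexString rt.tail (c :: st) :=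
      pvGetT_tail_tails_map rt _ (by simp [pvRegexString])
    simp only [pvBuildRow, List.tails_cons, List.map_cons, List.tail_cons, List.headD_cons,
      ih, pvGetT_cons, pvCharMatch_eq, Prod.mk.injEq, List.cons.injEq]
    refine ⟨⟨?_, trivial⟩, ?_, trivial⟩
    · -- M entry equals regex_string (r0 :: rt) (c :: st)
      rw [pvRegexString]
      simp only [hA, hB, hC, hD]
      by_cases hb : (r0 == '\\') = true
      · simp [hb]
      · by_cases h1 : (pvRegexChar r0 c && rt.head? == some '+') = true
        · have hplus : (rt.head? == some '+') = true := by
            exact (Bool.and_eq_true _ _ |>.mp h1).2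
          simp [hb, pvPlusG, hplus]
        · simp [hb, h1]
    · -- P entry equals the guarded plus_handle value at (r0 :: rt, c :: st)
      cases hplus : (rt.head? == some '+')
      · simp [pvPlusG, hplus]
      · rw [show pvPlusG (r0 :: rt) (c :: st)
              = pvPlusHandle (r0 :: rt) (c :: st) by simp [pvPlusG, hplus]]
        rw [pvPlusHandle]
        cases hmc : pvRegexChar r0 c
        · simp
        · simp [hplus, hA, pvPlusG]

theorem pvBuildRows_eq (r : List Char) (s : List Char) :
    pvBuildRows r s = ((r.tails.map (fun r' => pvRegexString r' s),
                        r.tails.map (fun r' => pvPlusG r' s)),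
                       s.tails.foldr (fun s' acc =>
                         (if s' = [] then false else pvRegexString r s') || acc) false) := by
  induction s with
  | nil => simp [pvBuildRows, pvBaseRow_eq]
  | cons c st ih =>
    simp only [pvBuildRows, ih, pvBuildRow_eq]
    simp [pvGetT_tails_map]

theorem pvImprovedGo_found (r0 : Char) (rt : List Char) (s : List Char) (h : ¬ r0 == '^') :
    pvImprovedGo (r0 :: rt) s
      = s.tails.foldr (fun s' acc =>
          (if s' = [] then false else pvRegexString (r0 :: rt) s') || acc) false := by
  induction s with
  | nil => simp [pvImprovedGo]
  | cons c st ih =>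
    rw [pvImprovedGo]
    simp only [h]
    by_cases hm : pvRegexString (r0 :: rt) (c :: st) = true
    · simp [hm]
    · simp [hm, ih]

-- ===== VERDICT (by name: the statement is the Claim_ definition above) =====
theorem regex_string_improved_spec : Claim_equal_regex_string_improved := by
  intro regex string_ _
  unfold Spec_regex_string_improved regex_string_improved regex_string_improved_alt
  cases hr : regex.toList with
  | nil => simp [pvImprovedGo]
  | cons r0 rt =>
    cases hs : string_.toList with
    | nil => simp [pvImprovedGo]
    | cons c st =>
      simp only [pvBuildRows_eq]
      by_cases hc : r0 == '^'
      · rw [pvImprovedGo]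
        simp only [hc, if_true]
        rw [show ((r0 :: rt).tails.map (fun r' => pvRegexString r' (c :: st))).tail
              = rt.tails.map (fun r' => pvRegexString r' (c :: st)) by simp]
        rw [pvGetT_tails_map]
      · simp only [hc]
        exact pvImprovedGo_found r0 rt (c :: st) (by simpa using hc)
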